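-- pv_equiv track=rewrite | github.com/willisguo14/llmsys_s25_hw4 | pipeline/pipe.py | _clock_cycles
-- ===== SOURCE A (Python) =====
-- from typing import Any, Iterable, Iterator, List, Optional, Union, Sequence, Tuple, cast
--
-- def _clock_cycles(num_batches: int, num_partitions: int) -> Iterable[List[Tuple[int, int]]]:
--     '''Generate schedules for each clock cycle.
--
--     An example of the generated schedule for m=3 and n=3 is as follows:
--
--     k (i,j) (i,j) (i,j)
--     - ----- ----- -----
--     0 (0,0)
--     1 (1,0) (0,1)
--     2 (2,0) (1,1) (0,2)
--     3       (2,1) (1,2)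
--     4             (2,2)
--
--     where k is the clock number, i is the index of micro-batch, and j is the index of partition.
--
--     Each schedule is a list of tuples. Each tuple contains the index of micro-batch and the index of partition.
--     This function should yield schedules for each clock cycle.
--     '''
--     # BEGIN SOLUTION
--     num_cycles = num_batches + num_partitions - 1
--
--     for t in range(num_cycles):
--         schedule = []
--
--         for i in range(num_partitions):
--             micro_batch_idx = t - i
--
--             if 0 <= micro_batch_idx < num_batches:
--                 schedule.append((micro_batch_idx, i))
--
--         yield schedule
-- ===== SOURCE B (Python) =====
-- def _clock_cycles(num_batches, num_partitions):
--     """Scatter every (micro-batch, partition) pair into its clock-cycle bucket,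
--     then yield the buckets in order (instead of re-deriving each cycle by a
--     filtered scan over partitions)."""
--     num_cycles = num_batches + num_partitions - 1
--     table = [[] for _ in range(num_cycles)]
--     if num_batches > 0:
--         for j in range(num_partitions):
--             for i in range(num_batches):
--                 table[i + j].append((i, j))
--     yield from table
-- ===== Notes on version B (the rewrite author's own statement) =====
-- stated objective: alternative
-- what changed: B precomputes one bucket per clock cycle and scatters each (batch, partition) pair into bucket i+j in a single grid pass, instead of A's per-cycle filtered scan over all partitions.
import Mathlib
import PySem

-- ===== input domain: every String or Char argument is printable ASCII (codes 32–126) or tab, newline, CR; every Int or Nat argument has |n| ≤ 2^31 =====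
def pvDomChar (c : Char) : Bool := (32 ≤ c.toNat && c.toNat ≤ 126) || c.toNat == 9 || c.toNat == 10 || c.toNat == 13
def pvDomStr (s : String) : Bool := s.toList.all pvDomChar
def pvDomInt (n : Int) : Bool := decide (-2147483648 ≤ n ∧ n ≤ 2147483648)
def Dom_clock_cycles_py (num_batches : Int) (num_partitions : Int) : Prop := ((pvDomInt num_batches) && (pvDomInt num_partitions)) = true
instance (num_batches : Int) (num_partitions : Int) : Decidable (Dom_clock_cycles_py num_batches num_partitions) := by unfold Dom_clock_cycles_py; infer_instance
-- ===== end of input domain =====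

-- B scatters every (batch, partition) pair into its clock-cycle bucket in one grid pass,
-- instead of A's per-cycle filtered scan over partitions (alternative decomposition, same results).


-- ===== PORT A =====
-- for t in range(num_cycles): build schedule by scanning partitions i, append (t-i, i) when in range; yield schedule
def clock_cycles_py (num_batches : Int) (num_partitions : Int) : List (List (Int × Int)) :=
  let num_cycles := num_batches + num_partitions - 1
  (PySem.List.pyRange 0 num_cycles 1).map (fun t =>
    (PySem.List.pyRange 0 num_partitions 1).foldl (fun schedule i =>
      if 0 ≤ t - i ∧ t - i < num_batches then schedule ++ [(t - i, i)] else schedule) [])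

-- ===== PORT B =====
-- table of num_cycles empty buckets; if there are micro-batches: for j, for i: table[i+j].append((i,j)); yield each bucket.
-- Inside the loops 0 ≤ i + j, so indexing bucket (i+j) by the Nat (i+j).toNat is exact.
def clock_cycles_py_alt (num_batches : Int) (num_partitions : Int) : List (List (Int × Int)) :=
  let num_cycles := num_batches + num_partitions - 1
  let table : List (List (Int × Int)) :=
    (PySem.List.pyRange 0 num_cycles 1).map (fun _ => [])
  if 0 < num_batches then
    (PySem.List.pyRange 0 num_partitions 1).foldl (fun table j =>
      (PySem.List.pyRange 0 num_batches 1).foldl (fun table i =>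
        table.set (i + j).toNat (table.getD (i + j).toNat [] ++ [(i, j)])) table) table
  else table

-- ===== PRECONDITION & SPEC =====
def Spec_clock_cycles_py (num_batches : Int) (num_partitions : Int) (out : List (List (Int × Int))) : Prop := out = clock_cycles_py_alt num_batches num_partitions
instance (num_batches : Int) (num_partitions : Int) (out : List (List (Int × Int))) : Decidable (Spec_clock_cycles_py num_batches num_partitions out) := by unfold Spec_clock_cycles_py; infer_instance

-- ===== CLAIM (what is proved, stated in full; the proofs are below) =====
def Claim_equal_clock_cycles_py : Prop := ∀ (num_batches : Int) (num_partitions : Int), Dom_clock_cycles_py num_batches num_partitions → Spec_clock_cycles_py num_batches num_partitions (clock_cycles_py num_batches num_partitions)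

-- ===== LEMMAS AND PROOFS =====

-- the inner-loop step of B for a fixed partition j
def pvStep (j : Int) (tbl : List (List (Int × Int))) (i : Int) : List (List (Int × Int)) :=
  tbl.set (i + j).toNat (tbl.getD (i + j).toNat [] ++ [(i, j)])

lemma pvStep_length (j : Int) (tbl : List (List (Int × Int))) (i : Int) :
    (pvStep j tbl i).length = tbl.length := by
  simp [pvStep]

lemma pvInner_length (m : Nat) (j : Int) (tbl : List (List (Int × Int))) :
    ((List.range m).foldl (fun tbl (k : Nat) => pvStep j tbl (k : Int)) tbl).length
      = tbl.length := by
  induction m generalizing tbl with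
  | zero => simp
  | succ m ih => rw [List.range_succ, List.foldl_append]; simp [pvStep_length, ih]

-- effect of B's inner loop (batches 0..m-1 of partition j) on bucket t
lemma pvInner_getD (m : Nat) (j : Int) (hj : 0 ≤ j) (tbl : List (List (Int × Int)))
    (t : Nat) (ht : t < tbl.length) :
    ((List.range m).foldl (fun tbl (k : Nat) => pvStep j tbl (k : Int)) tbl).getD t []
      = tbl.getD t [] ++ (if 0 ≤ (t : Int) - j ∧ (t : Int) - j < m then [((t : Int) - j, j)] else []) := by
  induction m generalizing tbl with
  | zero =>
    simp only [List.range_zero, List.foldl_nil]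
    rw [if_neg]; · simp
    rintro ⟨h1, h2⟩; omega
  | succ m ih =>
    rw [List.range_succ, List.foldl_append, List.foldl_cons, List.foldl_nil]
    have hlen : ((List.range m).foldl (fun tbl (k : Nat) => pvStep j tbl (k : Int)) tbl).length
        = tbl.length := pvInner_length m j tbl
    set r := (List.range m).foldl (fun tbl (k : Nat) => pvStep j tbl (k : Int)) tbl with hr
    have hrt := ih tbl ht
    have htr : t < r.length := by rw [hlen]; exact ht
    by_cases hidx : (t : Int) = (m : Int) + j
    · -- this step writes bucket t
      have hnat : ((m : Int) + j).toNat = t := by omega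
      simp only [pvStep]
      rw [hnat]
      rw [List.getD_eq_getElem?_getD, List.getElem?_set_self' ]
      simp only [htr, List.getElem?_eq_getElem]
      rw [List.getD_eq_getElem _ _ htr] at hrt ⊢
      rw [hrt]
      have hfalse : ¬ (0 ≤ (t : Int) - j ∧ (t : Int) - j < (m : Int)) := by omega
      have htrue : (0 ≤ (t : Int) - j ∧ (t : Int) - j < ((m + 1 : Nat) : Int)) := by
        push_cast; omega
      rw [if_neg hfalse, if_pos htrue]
      have : (t : Int) - j = (m : Int) := by omega
      simp [this]
    · -- this step writes a different bucket (or none)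
      have hne : (((m : Int) + j).toNat) ≠ t := by omega
      simp only [pvStep]
      rw [List.getD_eq_getElem?_getD, List.getElem?_set_ne hne, ← List.getD_eq_getElem?_getD]
      rw [hrt]
      congr 1
      by_cases hc : 0 ≤ (t : Int) - j ∧ (t : Int) - j < (m : Int)
      · rw [if_pos hc, if_pos ⟨hc.1, by push_cast; omega⟩]
      · rw [if_neg hc, if_neg (by push_cast at hc ⊢; omega)]

-- effect of B's outer loop (partitions 0..J-1) on bucket t
lemma pvOuter_length (J : Nat) (nb : Int) (tbl : List (List (Int × Int))) :
    ((List.range J).foldl (fun tbl (j : Nat) =>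
        (List.range nb.toNat).foldl (fun tbl (k : Nat) => pvStep (j : Int) tbl (k : Int)) tbl) tbl).length
      = tbl.length := by
  induction J generalizing tbl with
  | zero => simp
  | succ J ih => rw [List.range_succ, List.foldl_append]; simp [pvInner_length, ih]

lemma pvOuter_getD (J : Nat) (nb : Int) (tbl : List (List (Int × Int)))
    (t : Nat) (ht : t < tbl.length) :
    ((List.range J).foldl (fun tbl (j : Nat) =>
        (List.range nb.toNat).foldl (fun tbl (k : Nat) => pvStep (j : Int) tbl (k : Int)) tbl) tbl).getD t []
      = tbl.getD t [] ++ (((List.range J).map (fun (j : Nat) => (j : Int))).filter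
            (fun j => decide (0 ≤ (t : Int) - j ∧ (t : Int) - j < nb))).map
            (fun j => ((t : Int) - j, j)) := by
  induction J generalizing tbl with
  | zero => simp
  | succ J ih =>
    rw [List.range_succ, List.foldl_append, List.foldl_cons, List.foldl_nil]
    set r := (List.range J).foldl (fun tbl (j : Nat) =>
        (List.range nb.toNat).foldl (fun tbl (k : Nat) => pvStep (j : Int) tbl (k : Int)) tbl) tbl with hr
    have hlen : r.length = tbl.length := pvOuter_length J nb tbl
    have htr : t < r.length := by rw [hlen]; exact ht
    have h1 := pvInner_getD nb.toNat (J : Int) (by positivity) r t htr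
    rw [h1, ih tbl ht]
    rw [List.map_append, List.filter_append, List.map_append, List.append_assoc]
    congr 1
    simp only [List.map_cons, List.map_nil, List.filter_cons, List.filter_nil]
    have hiff : (0 ≤ (t : Int) - (J : Int) ∧ (t : Int) - (J : Int) < ((nb.toNat : Nat) : Int)) ↔
        (0 ≤ (t : Int) - (J : Int) ∧ (t : Int) - (J : Int) < nb) := by omega
    by_cases hc : 0 ≤ (t : Int) - (J : Int) ∧ (t : Int) - (J : Int) < nb
    · rw [if_pos (hiff.mpr hc), if_pos (by simp only [decide_eq_true_eq]; exact hc)]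
      simp
    · rw [if_neg (fun h => hc (hiff.mp h)), if_neg (by simp only [decide_eq_true_eq]; exact hc)]
      simp

-- A's t-th schedule as a filter/map
lemma pvA_sched (nb np t : Int) :
    (PySem.List.pyRange 0 np 1).foldl (fun schedule i =>
        if 0 ≤ t - i ∧ t - i < nb then schedule ++ [(t - i, i)] else schedule) []
      = (((List.range np.toNat).map (fun (j : Nat) => (j : Int))).filter
            (fun j => decide (0 ≤ t - j ∧ t - j < nb))).map (fun j => (t - j, j)) := by
  rw [PySem.List.foldl_append_ite (p := fun i => 0 ≤ t - i ∧ t - i < nb)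
      (f := fun i => (t - i, i))]
  rw [PySem.List.pyRange_one]
  simp

lemma pvFoldl_id (J : Nat) (tbl : List (List (Int × Int))) :
    (List.range J).foldl (fun tbl (_ : Nat) => tbl) tbl = tbl := by
  induction J with
  | zero => simp
  | succ J ih => rw [List.range_succ, List.foldl_append, List.foldl_cons, List.foldl_nil]; exact ih

theorem pv_main (nb np : Int) : clock_cycles_py nb np = clock_cycles_py_alt nb np := by
  unfold clock_cycles_py clock_cycles_py_alt
  simp only []
  set nc := nb + np - 1 with hnc
  set tbl0 := (PySem.List.pyRange 0 nc 1).map (fun _ => ([] : List (Int × Int))) with htbl0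
  have hB : (if 0 < nb then (PySem.List.pyRange 0 np 1).foldl (fun table j =>
      (PySem.List.pyRange 0 nb 1).foldl (fun table i =>
        table.set (i + j).toNat (table.getD (i + j).toNat [] ++ [(i, j)])) table) tbl0
      else tbl0)
      = (List.range np.toNat).foldl (fun tbl (j : Nat) =>
          (List.range nb.toNat).foldl (fun tbl (k : Nat) => pvStep (j : Int) tbl (k : Int)) tbl) tbl0 := by
    by_cases hnb : 0 < nb
    · rw [if_pos hnb]
      rw [PySem.List.pyRange_one 0 np, List.foldl_map]
      rw [show ((np - 0).toNat) = np.toNat by omega]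
      congr 1
      funext tbl j
      rw [PySem.List.pyRange_one 0 nb, List.foldl_map]
      simp [pvStep]
    · rw [if_neg hnb]
      rw [show nb.toNat = 0 by omega]
      simp only [List.range_zero, List.foldl_nil]
      exact (pvFoldl_id np.toNat tbl0).symm
  rw [hB]
  have hlen0 : tbl0.length = nc.toNat := by simp [htbl0, PySem.List.pyRange_one]
  apply List.ext_getElem
  · rw [pvOuter_length, hlen0]
    simp [PySem.List.pyRange_one]
  · intro t h1 h2
    have ht : t < tbl0.length := by
      rw [hlen0]
      simpa [PySem.List.pyRange_one] using h1
    rw [← List.getD_eq_getElem _ ([] : List (Int × Int)) h2]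
    rw [pvOuter_getD np.toNat nb tbl0 t ht]
    have hz : tbl0.getD t [] = ([] : List (Int × Int)) := by
      rw [List.getD_eq_getElem _ _ ht]
      simp [htbl0]
    rw [hz, List.nil_append]
    rw [List.getElem_map, PySem.List.getElem_pyRange_one]
    rw [pvA_sched]
    simp

-- ===== VERDICT (by name: the statement is the Claim_ definition above) =====
theorem clock_cycles_py_spec : Claim_equal_clock_cycles_py := by
  intro nb np _
  unfold Spec_clock_cycles_py
  exact pv_main nb np
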